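-- pv_equiv track=rewrite | github.com/SashaV21/Algorithm | 2.0/Lection 7 YANDEX/ex_6_good.py | is_parking_full
-- ===== SOURCE A (Python) =====
-- def is_parking_full(cars, n):
--     events = []
--     for i in range(len(cars)):
--         tin, tout, place_from, place_to = cars[i]
--         events.append((tin, 1, place_to - place_from + 1, i))
--         events.append((tout, -1, place_to - place_from + 1, i))
--     events.sort()
--     occupied = 0
--     now_cars = 0
--     min_cars = len(cars) + 1
--     for i in range(len(events)):
--         if events[i][1] == -1:
--             occupied -= events[i][2]
--             now_cars -= 1
--         elif events[i][1] == 1: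
--             occupied += events[i][2]
--             now_cars += 1
--         if occupied == n:
--             min_cars = min(min_cars, now_cars)
--
--     car_nums = set()
--     now_cars = 0
--     for i in range(len(events)):
--         if events[i][1] == -1:
--             car_nums.remove(events[i][3])
--             occupied -= events[i][2]
--             now_cars -= 1
--
--         elif events[i][1] == 1:
--             car_nums.add(events[i][3])
--             occupied += events[i][2]
--             now_cars += 1
--         if occupied == n and min_cars == now_cars:
--             return car_nums
--     return set()
-- ===== SOURCE B (Python) =====
-- def is_parking_full(cars, n):
--     events = sorted(e for i, (tin, tout, pf, pt) in enumerate(cars)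
--                     for e in ((tin, 1, pt - pf + 1, i), (tout, -1, pt - pf + 1, i)))
--     car_nums = set()
--     occupied = 0
--     now_cars = 0
--     best = None
--     for t, typ, size, i in events:
--         if typ == -1:
--             car_nums.remove(i)
--             occupied -= size
--             now_cars -= 1
--         elif typ == 1:
--             car_nums.add(i)
--             occupied += size
--             now_cars += 1
--         if occupied == n and (best is None or now_cars < best[0]):
--             best = (now_cars, set(car_nums))
--     return best[1] if best is not None else set()
-- ===== Notes on version B (the rewrite author's own statement) =====
-- stated objective: simpler
-- what changed: A's two sequential event sweeps (first compute the global minimum car count over full-parking moments, then re-scan with set bookkeeping to return the first snapshot at that minimum) are fused into one sweep that maintains the live set and keeps the first strictly-smaller full-parking snapshot, selecting the answer without a second pass.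
-- outside the precondition, e.g. on is_parking_full([(4, 2, 1, 1), (0, 1, -4, -3)], 0): A returns set(), B raises KeyError
import Mathlib
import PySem

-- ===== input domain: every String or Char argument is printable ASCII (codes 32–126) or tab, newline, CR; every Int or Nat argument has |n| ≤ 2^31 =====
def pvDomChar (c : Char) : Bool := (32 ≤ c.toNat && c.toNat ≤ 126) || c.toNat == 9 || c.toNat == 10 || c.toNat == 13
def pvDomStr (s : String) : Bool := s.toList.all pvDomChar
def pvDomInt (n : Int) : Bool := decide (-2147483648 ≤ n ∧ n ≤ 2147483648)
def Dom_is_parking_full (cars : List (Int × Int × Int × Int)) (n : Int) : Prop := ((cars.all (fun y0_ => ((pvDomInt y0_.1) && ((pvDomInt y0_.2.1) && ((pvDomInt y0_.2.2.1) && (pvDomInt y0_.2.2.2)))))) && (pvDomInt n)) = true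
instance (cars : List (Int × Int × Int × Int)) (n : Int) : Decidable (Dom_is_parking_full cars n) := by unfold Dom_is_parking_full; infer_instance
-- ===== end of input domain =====

-- B fuses A's two passes (global-minimum pass, then a re-scan for the first snapshot at that
-- minimum) into ONE sweep that keeps the first strictly-smaller full-parking snapshot; objective:
-- simpler (one traversal of the events, no second bookkeeping loop).

-- ===== PORT A =====

-- the two events of one enumerated car p = (i, (tin, tout, place_from, place_to)) — shared tuple construction
def pvEvOf (p : Int × (Int × Int × Int × Int)) : List (Int × Int × Int × Int) :=
  [(p.2.1, 1, p.2.2.2.2 - p.2.2.2.1 + 1, p.1), (p.2.2.1, -1, p.2.2.2.2 - p.2.2.2.1 + 1, p.1)]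

-- events.sort() on 4-tuples of ints: Python's lexicographic tuple sort, expressed exactly as a
-- stable sort by the minor key pair (size, index) followed by a stable sort by the major key pair
-- (time, type) — stable-radix decomposition of the lexicographic order, value-exact.
def pvSortEvents (es : List (Int × Int × Int × Int)) : List (Int × Int × Int × Int) :=
  PySem.List.sorted2 (PySem.List.sorted2 es (fun e => e.2.2.1) (fun e => e.2.2.2))
    (fun e => e.1) (fun e => e.2.1)

-- A's first loop: state (occupied, now_cars, min_cars)
def pvPass1 (n : Int) (es : List (Int × Int × Int × Int)) (st : Int × Int × Int) : Int × Int × Int :=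
  es.foldl (fun st e =>
    let s' : Int × Int :=
      if e.2.1 = -1 then (st.1 - e.2.2.1, st.2.1 - 1)
      else if e.2.1 = 1 then (st.1 + e.2.2.1, st.2.1 + 1)
      else (st.1, st.2.1)
    (s'.1, s'.2, if s'.1 = n then min st.2.2 s'.2 else st.2.2)) st

-- A's second loop with its early return; car_nums.remove is Set.discard, exact under
-- Pre_ (each exit event follows the matching entry, so the element is always present).
def pvPass2 (n m : Int) : List (Int × Int × Int × Int) → PySem.Set Int → Int → Int → List Int
  | [], _, _, _ => []
  | e :: rest, s, occ, now =>
    let st : PySem.Set Int × Int × Int :=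
      if e.2.1 = -1 then (PySem.Set.discard s e.2.2.2, occ - e.2.2.1, now - 1)
      else if e.2.1 = 1 then (PySem.Set.add s e.2.2.2, occ + e.2.2.1, now + 1)
      else (s, occ, now)
    if st.2.1 = n ∧ m = st.2.2 then st.1 else pvPass2 n m rest st.1 st.2.1 st.2.2

def is_parking_full (cars : List (Int × Int × Int × Int)) (n : Int) : List Int :=
  let events := pvSortEvents ((PySem.List.enumerate cars).foldl (fun ev p => ev ++ pvEvOf p) [])
  let st := pvPass1 n events (0, 0, PySem.List.len cars + 1)
  -- second loop: car_nums = set(), now_cars = 0, occupied NOT reset (carries pass 1's final value)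
  pvPass2 n st.2.2 events PySem.Set.empty st.1 0

-- ===== PORT B =====

-- B's single sweep: state (car_nums, occupied, now_cars, best); best = None | (now_cars, snapshot)
def pvSweep (n : Int) (es : List (Int × Int × Int × Int))
    (st : PySem.Set Int × Int × Int × Option (Int × List Int)) :
    PySem.Set Int × Int × Int × Option (Int × List Int) :=
  es.foldl (fun (st : PySem.Set Int × Int × Int × Option (Int × List Int)) (e : Int × Int × Int × Int) =>
    let u : PySem.Set Int × Int × Int :=
      -- car_nums.remove is Set.discard, exact under Pre_ (the element is always present there)
      if e.2.1 = -1 then (PySem.Set.discard st.1 e.2.2.2, st.2.1 - e.2.2.1, st.2.2.1 - 1)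
      else if e.2.1 = 1 then (PySem.Set.add st.1 e.2.2.2, st.2.1 + e.2.2.1, st.2.2.1 + 1)
      else (st.1, st.2.1, st.2.2.1)
    (u.1, u.2.1, u.2.2,
      -- 'occupied == n and (best is None or now_cars < best[0])' with the or as a match
      if u.2.1 = n then
        match st.2.2.2 with
        | none => some (u.2.2, (u.1 : List Int))
        | some b => if u.2.2 < b.1 then some (u.2.2, (u.1 : List Int)) else some b
      else st.2.2.2)) st

def is_parking_full_alt (cars : List (Int × Int × Int × Int)) (n : Int) : List Int :=
  let events := pvSortEvents ((PySem.List.enumerate cars).flatMap pvEvOf)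
  match (pvSweep n events (PySem.Set.empty, 0, 0, none)).2.2.2 with
  | some b => b.2
  | none => []

-- ===== PRECONDITION & SPEC =====
-- Pre_ excludes cars with tout ≤ tin: their exit event sorts before the matching entry event and
-- car_nums.remove raises KeyError (always in B, in A unless its early return fires first; on those
-- rare early-return inputs A's value is the accident of a pre-crash prefix, excluded with the rest).
def Pre_is_parking_full (cars : List (Int × Int × Int × Int)) (n : Int) : Prop :=
  ∀ c ∈ cars, c.1 < c.2.1
instance (cars : List (Int × Int × Int × Int)) (n : Int) : Decidable (Pre_is_parking_full cars n) := by
  unfold Pre_is_parking_full; infer_instance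

def pvWitness_is_parking_full : (List (Int × Int × Int × Int)) × Int :=
  ([(0, 2, 1, 3), (1, 4, 4, 5)], 3)

def Spec_is_parking_full (cars : List (Int × Int × Int × Int)) (n : Int) (out : List Int) : Prop := out = is_parking_full_alt cars n
instance (cars : List (Int × Int × Int × Int)) (n : Int) (out : List Int) : Decidable (Spec_is_parking_full cars n out) := by unfold Spec_is_parking_full; infer_instance

-- ===== CLAIM (what is proved, stated in full; the proofs are below) =====
def Claim_equal_is_parking_full : Prop := ∀ (cars : List (Int × Int × Int × Int)) (n : Int), Dom_is_parking_full cars n → Pre_is_parking_full cars n → Spec_is_parking_full cars n (is_parking_full cars n)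

-- ===== LEMMAS AND PROOFS =====

-- the common trajectory: snapshots (now_cars, car_nums) at each moment where occupied = n
def pvFulls (n : Int) : List (Int × Int × Int × Int) → PySem.Set Int → Int → Int → List (Int × List Int)
  | [], _, _, _ => []
  | e :: rest, s, occ, now =>
    let st : PySem.Set Int × Int × Int :=
      if e.2.1 = -1 then (PySem.Set.discard s e.2.2.2, occ - e.2.2.1, now - 1)
      else if e.2.1 = 1 then (PySem.Set.add s e.2.2.2, occ + e.2.2.1, now + 1)
      else (s, occ, now)
    (if st.2.1 = n then [(st.2.2, (st.1 : List Int))] else []) ++ pvFulls n rest st.1 st.2.1 st.2.2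

def pvDelta (e : Int × Int × Int × Int) : Int :=
  if e.2.1 = -1 then -e.2.2.1 else if e.2.1 = 1 then e.2.2.1 else 0

def pvDeltaN (e : Int × Int × Int × Int) : Int :=
  if e.2.1 = -1 then -1 else if e.2.1 = 1 then 1 else 0

-- first element of minimal first component (ties: earliest)
def pvSel : List (Int × List Int) → Option (Int × List Int)
  | [] => none
  | p :: rest =>
    match pvSel rest with
    | none => some p
    | some q => if p.1 ≤ q.1 then some p else some q

def pvUpd (b : Option (Int × List Int)) (p : Int × List Int) : Option (Int × List Int) :=
  match b with
  | none => some p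
  | some q => if p.1 < q.1 then some p else some q

theorem pvPass1_eq (n : Int) (es : List (Int × Int × Int × Int)) :
    ∀ (s : PySem.Set Int) (occ now mc : Int),
      pvPass1 n es (occ, now, mc) =
        (occ + (es.map pvDelta).sum, now + (es.map pvDeltaN).sum,
          List.foldl min mc ((pvFulls n es s occ now).map Prod.fst)) := by
  induction es with
  | nil => intro s occ now mc; simp [pvPass1, pvFulls]
  | cons e rest ih =>
    intro s occ now mc
    obtain ⟨t, ty, sz, i⟩ := e
    by_cases h1 : ty = -1
    · by_cases hf : occ - sz = n
      · have := ih (PySem.Set.discard s i) (occ - sz) (now - 1) (min mc (now - 1))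
        simp [pvPass1, pvFulls, pvDelta, pvDeltaN, h1, hf] at this ⊢
        rw [this]; exact congrArg₂ Prod.mk (by omega) (congrArg₂ Prod.mk (by omega) rfl)
      · have := ih (PySem.Set.discard s i) (occ - sz) (now - 1) mc
        simp [pvPass1, pvFulls, pvDelta, pvDeltaN, h1, hf] at this ⊢
        rw [this]; exact congrArg₂ Prod.mk (by omega) (congrArg₂ Prod.mk (by omega) rfl)
    · by_cases h2 : ty = 1
      · by_cases hf : occ + sz = n
        · have := ih (PySem.Set.add s i) (occ + sz) (now + 1) (min mc (now + 1))
          simp [pvPass1, pvFulls, pvDelta, pvDeltaN, h1, h2, hf] at this ⊢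
          rw [this]; exact congrArg₂ Prod.mk (by omega) (congrArg₂ Prod.mk (by omega) rfl)
        · have := ih (PySem.Set.add s i) (occ + sz) (now + 1) mc
          simp [pvPass1, pvFulls, pvDelta, pvDeltaN, h1, h2, hf] at this ⊢
          rw [this]; exact congrArg₂ Prod.mk (by omega) (congrArg₂ Prod.mk (by omega) rfl)
      · by_cases hf : occ = n
        · have := ih s occ now (min mc now)
          simp [pvPass1, pvFulls, pvDelta, pvDeltaN, h1, h2, hf] at this ⊢
          rw [this]
        · have := ih s occ now mc
          simp [pvPass1, pvFulls, pvDelta, pvDeltaN, h1, h2, hf] at this ⊢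
          rw [this]

theorem pvPass2_eq (n m : Int) (es : List (Int × Int × Int × Int)) :
    ∀ (s : PySem.Set Int) (occ now : Int),
      pvPass2 n m es s occ now =
        (match (pvFulls n es s occ now).find? (fun p => decide (m = p.1)) with
         | some p => p.2
         | none => []) := by
  induction es with
  | nil => intro s occ now; simp [pvPass2, pvFulls]
  | cons e rest ih =>
    intro s occ now
    obtain ⟨t, ty, sz, i⟩ := e
    by_cases h1 : ty = -1 <;> by_cases h2 : ty = 1 <;>
      simp_all [pvPass2, pvFulls] <;> split_ifs with hf hm <;>
      simp_all [List.find?_cons, ih]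

theorem pvSweep_eq (n : Int) (es : List (Int × Int × Int × Int)) :
    ∀ (s : PySem.Set Int) (occ now : Int) (b : Option (Int × List Int)),
      (pvSweep n es (s, occ, now, b)).2.2.2 =
        List.foldl pvUpd b (pvFulls n es s occ now) := by
  induction es with
  | nil => intro s occ now b; simp [pvSweep, pvFulls]
  | cons e rest ih =>
    intro s occ now b
    obtain ⟨t, ty, sz, i⟩ := e
    by_cases h1 : ty = -1
    · by_cases hf : occ - sz = n
      · have hstep : (pvSweep n ((t,ty,sz,i) :: rest) (s,occ,now,b)).2.2.2
            = (pvSweep n rest (PySem.Set.discard s i, occ - sz, now - 1,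
                pvUpd b (now - 1, (PySem.Set.discard s i : List Int)))).2.2.2 := by
          cases b <;> simp [pvSweep, pvUpd, h1, hf]
        rw [hstep, ih]; simp [pvFulls, h1, hf]
      · have hstep : (pvSweep n ((t,ty,sz,i) :: rest) (s,occ,now,b)).2.2.2
            = (pvSweep n rest (PySem.Set.discard s i, occ - sz, now - 1, b)).2.2.2 := by
          simp [pvSweep, h1, hf]
        rw [hstep, ih]; simp [pvFulls, h1, hf]
    · by_cases h2 : ty = 1
      · by_cases hf : occ + sz = n
        · have hstep : (pvSweep n ((t,ty,sz,i) :: rest) (s,occ,now,b)).2.2.2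
              = (pvSweep n rest (PySem.Set.add s i, occ + sz, now + 1,
                  pvUpd b (now + 1, (PySem.Set.add s i : List Int)))).2.2.2 := by
            cases b <;> simp [pvSweep, pvUpd, h1, h2, hf]
          rw [hstep, ih]; simp [pvFulls, h1, h2, hf]
        · have hstep : (pvSweep n ((t,ty,sz,i) :: rest) (s,occ,now,b)).2.2.2
              = (pvSweep n rest (PySem.Set.add s i, occ + sz, now + 1, b)).2.2.2 := by
            simp [pvSweep, h1, h2, hf]
          rw [hstep, ih]; simp [pvFulls, h1, h2, hf]
      · by_cases hf : occ = n
        · have hstep : (pvSweep n ((t,ty,sz,i) :: rest) (s,occ,now,b)).2.2.2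
              = (pvSweep n rest (s, occ, now, pvUpd b (now, (s : List Int)))).2.2.2 := by
            cases b <;> simp [pvSweep, pvUpd, h1, h2, hf]
          rw [hstep, ih]; simp [pvFulls, h1, h2, hf]
        · have hstep : (pvSweep n ((t,ty,sz,i) :: rest) (s,occ,now,b)).2.2.2
              = (pvSweep n rest (s, occ, now, b)).2.2.2 := by
            simp [pvSweep, h1, h2, hf]
          rw [hstep, ih]; simp [pvFulls, h1, h2, hf]

def pvComb : Option (Int × List Int) → Option (Int × List Int) → Option (Int × List Int)
  | none, r => r
  | some p, none => some p
  | some p, some q => if q.1 < p.1 then some q else some p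

theorem pvFoldlUpd_eq (L : List (Int × List Int)) :
    ∀ b, List.foldl pvUpd b L = pvComb b (pvSel L) := by
  induction L with
  | nil => intro b; cases b <;> simp [pvSel, pvComb]
  | cons p rest ih =>
    intro b
    rw [List.foldl_cons, ih]
    cases b with
    | none =>
      simp only [pvUpd, pvSel]
      cases h : pvSel rest with
      | none => simp [pvComb]
      | some q => by_cases hle : p.1 ≤ q.1 <;> simp [pvComb, hle] <;> omega
    | some b0 =>
      simp only [pvUpd, pvSel]
      cases h : pvSel rest with
      | none => by_cases hlt : p.1 < b0.1 <;> simp [pvComb, hlt]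
      | some q =>
        by_cases hlt : p.1 < b0.1 <;> by_cases hle : p.1 ≤ q.1 <;>
          by_cases hq : q.1 < b0.1 <;> simp [pvComb, hlt, hle, hq] <;> omega

theorem pvFoldlMin_eq (L : List (Int × List Int)) :
    ∀ m0 : Int, List.foldl min m0 (L.map Prod.fst) =
      (match pvSel L with | none => m0 | some q => min m0 q.1) := by
  induction L with
  | nil => intro m0; simp [pvSel]
  | cons p rest ih =>
    intro m0
    rw [List.map_cons, List.foldl_cons, ih]
    cases h : pvSel rest with
    | none => simp [pvSel, h]
    | some q => by_cases hle : p.1 ≤ q.1 <;> simp [pvSel, h, hle, min_def] <;> split_ifs <;> omega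

theorem pvSel_eq_none (L : List (Int × List Int)) (h : pvSel L = none) : L = [] := by
  cases L with
  | nil => rfl
  | cons p rest =>
    exfalso; simp only [pvSel] at h
    cases h2 : pvSel rest <;> simp [h2] at h
    split at h <;> simp_all

theorem pvSel_first_min (L : List (Int × List Int)) :
    ∀ q, pvSel L = some q →
      (∀ p ∈ L, q.1 ≤ p.1) ∧ L.find? (fun p => decide (q.1 = p.1)) = some q := by
  induction L with
  | nil => intro q h; simp [pvSel] at h
  | cons p rest ih =>
    intro q h
    simp only [pvSel] at h
    cases h2 : pvSel rest with
    | none =>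
      rw [h2] at h
      have : rest = [] := pvSel_eq_none rest h2
      subst this
      simp at h; subst h; simp
    | some q' =>
      rw [h2] at h
      dsimp only at h
      obtain ⟨hmin, hfind⟩ := ih q' h2
      by_cases hle : p.1 ≤ q'.1
      · rw [if_pos hle] at h
        cases h
        refine ⟨?_, ?_⟩
        · intro r hr
          rcases List.mem_cons.mp hr with rfl | hr
          · exact le_refl _
          · exact le_trans hle (hmin r hr)
        · simp [List.find?_cons]
      · rw [if_neg hle] at h
        cases h
        refine ⟨?_, ?_⟩
        · intro r hr
          rcases List.mem_cons.mp hr with rfl | hr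
          · omega
          · exact hmin r hr
        · rw [List.find?_cons_of_neg]
          · exact hfind
          · simp only [decide_eq_true_eq]
            intro hc; omega

theorem pvFulls_bound (n : Int) (es : List (Int × Int × Int × Int)) :
    ∀ (s : PySem.Set Int) (occ now : Int) (p : Int × List Int),
      p ∈ pvFulls n es s occ now →
        p.1 ≤ now + (es.countP (fun e => decide (e.2.1 = 1)) : Int) := by
  induction es with
  | nil => intro s occ now p hp; simp [pvFulls] at hp
  | cons e rest ih =>
    intro s occ now p hp
    obtain ⟨t, ty, sz, i⟩ := e
    by_cases h1 : ty = -1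
    · have hc : ((t, ty, sz, i) :: rest).countP (fun e => decide (e.2.1 = 1))
          = rest.countP (fun e => decide (e.2.1 = 1)) := by
        simp [List.countP_cons, h1]
      rw [hc]
      by_cases hf : occ - sz = n
      · simp [pvFulls, h1, hf] at hp
        rcases hp with h | h
        · rw [h]; omega
        · have := ih _ _ _ _ h; omega
      · simp [pvFulls, h1, hf] at hp
        have := ih _ _ _ _ hp; omega
    · by_cases h2 : ty = 1
      · have hc : ((t, ty, sz, i) :: rest).countP (fun e => decide (e.2.1 = 1))
            = rest.countP (fun e => decide (e.2.1 = 1)) + 1 := by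
          simp [List.countP_cons, h2]
        rw [hc]
        by_cases hf : occ + sz = n
        · simp [pvFulls, h1, h2, hf] at hp
          rcases hp with h | h
          · rw [h]; push_cast; omega
          · have := ih _ _ _ _ h; push_cast; omega
        · simp [pvFulls, h1, h2, hf] at hp
          have := ih _ _ _ _ hp; push_cast; omega
      · have hc : ((t, ty, sz, i) :: rest).countP (fun e => decide (e.2.1 = 1))
            = rest.countP (fun e => decide (e.2.1 = 1)) := by
          simp [List.countP_cons, h2]
        rw [hc]
        by_cases hf : occ = n
        · simp [pvFulls, h1, h2, hf] at hp
          rcases hp with h | h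
          · rw [h]; omega
          · have := ih _ _ _ _ h; omega
        · simp [pvFulls, h1, h2, hf] at hp
          have := ih _ _ _ _ hp; omega

theorem pvFlat_count (l : List (Int × (Int × Int × Int × Int))) :
    (l.flatMap pvEvOf).countP (fun e => decide (e.2.1 = 1)) = l.length := by
  induction l with
  | nil => simp
  | cons p rest ih => simp [List.flatMap_cons, List.countP_append, ih, pvEvOf, List.countP_cons]

theorem pvFlat_sum (l : List (Int × (Int × Int × Int × Int))) :
    ((l.flatMap pvEvOf).map pvDelta).sum = 0 := by
  induction l with
  | nil => simp
  | cons p rest ih => simp [List.flatMap_cons, ih, pvEvOf, pvDelta]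

theorem pvSort_perm (es : List (Int × Int × Int × Int)) : (pvSortEvents es).Perm es :=
  (PySem.List.sorted2_perm _ _ _ _).trans (PySem.List.sorted2_perm _ _ _ _)

theorem is_parking_full_spec : Claim_equal_is_parking_full := by
  intro cars n _ _
  unfold Spec_is_parking_full is_parking_full is_parking_full_alt
  dsimp only
  have hev : (PySem.List.enumerate cars).foldl (fun ev p => ev ++ pvEvOf p) []
      = (PySem.List.enumerate cars).flatMap pvEvOf := by
    rw [PySem.List.foldl_append_eq_flatMap]; simp
  rw [hev]
  have hperm := pvSort_perm ((PySem.List.enumerate cars).flatMap pvEvOf)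
  have hsum : ((pvSortEvents ((PySem.List.enumerate cars).flatMap pvEvOf)).map pvDelta).sum = 0 := by
    rw [(hperm.map pvDelta).sum_eq, pvFlat_sum]
  have hcnt : ((pvSortEvents ((PySem.List.enumerate cars).flatMap pvEvOf)).countP
      (fun e => decide (e.2.1 = 1)) : Nat) = cars.length := by
    rw [hperm.countP_eq, pvFlat_count, PySem.List.length_enumerate]
  rw [pvPass1_eq n _ PySem.Set.empty 0 0 (PySem.List.len cars + 1)]
  rw [pvPass2_eq, pvSweep_eq, pvFoldlUpd_eq]
  simp only [hsum, add_zero, zero_add, pvComb]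
  cases hsel : pvSel (pvFulls n (pvSortEvents ((PySem.List.enumerate cars).flatMap pvEvOf))
      PySem.Set.empty 0 0) with
  | none => rw [pvSel_eq_none _ hsel]; simp
  | some q =>
    obtain ⟨hmin, hfind⟩ := pvSel_first_min _ q hsel
    have hqmem : q ∈ pvFulls n (pvSortEvents ((PySem.List.enumerate cars).flatMap pvEvOf))
        PySem.Set.empty 0 0 := List.mem_of_find?_eq_some hfind
    have hqb := pvFulls_bound n _ PySem.Set.empty 0 0 q hqmem
    rw [hcnt] at hqb
    have hm : List.foldl min (PySem.List.len cars + 1)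
        ((pvFulls n (pvSortEvents ((PySem.List.enumerate cars).flatMap pvEvOf))
          PySem.Set.empty 0 0).map Prod.fst) = q.1 := by
      rw [pvFoldlMin_eq, hsel]
      dsimp only
      simp only [PySem.List.len_eq]
      exact min_eq_right (by omega)
    rw [hm, hfind]
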